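-- pv_equiv track=rewrite | github.com/badespider/videoeditor | backend/app/services/visual_validator.py | _detect_temporal_hallucination
-- ===== SOURCE A (Python) =====
-- from typing import List, Dict, Optional
--
-- def _detect_temporal_hallucination(
--
--     script_actions: Dict,
--     visual_actions: List[Dict]
-- ) -> bool:
--     """
--     Detect if script describes actions NOT visible in frames.
--
--     Returns True if hallucination detected.
--     """
--     script_states = set(script_actions.get('states', []))
--
--     hallucination_indicators = {
--         'already': 'past',
--         'just': 'past',
--         'about to': 'future',
--         'going to': 'future',
--         'will': 'future'
--     }
--
--     # Check for temporal mismatches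
--     for state in script_states:
--         for indicator, expected_time in hallucination_indicators.items():
--             if indicator in state.lower():
--                 # Get visual states
--                 visual_states = [
--                     word for va in visual_actions
--                     for word in va.get('states', [])
--                 ]
--
--                 if expected_time == 'future':
--                     # Script says "about to X" but visual shows "already X"
--                     if any('already' in vs or 'just' in vs for vs in visual_states):
--                         return True
--
--                 if expected_time == 'past':
--                     # Script says "already X" but visual shows "about to X"
--                     if any('about to' in vs or 'going to' in vs or 'will' in vs for vs in visual_states):
--                         return True
--
--     return False
-- ===== SOURCE B (Python) =====
-- def _detect_temporal_hallucination(script_actions, visual_actions):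
--     """Compute script/visual tense flags once, then combine them."""
--     PAST_INDICATORS = ('already', 'just')
--     FUTURE_INDICATORS = ('about to', 'going to', 'will')
--     states = script_actions.get('states', [])
--     script_past = any(i in s.lower() for s in states for i in PAST_INDICATORS)
--     script_future = any(i in s.lower() for s in states for i in FUTURE_INDICATORS)
--     if not (script_past or script_future):
--         return False
--     visual_states = [w for va in visual_actions for w in va.get('states', [])]
--     visual_past = any('already' in v or 'just' in v for v in visual_states)
--     visual_future = any('about to' in v or 'going to' in v or 'will' in v for v in visual_states)
--     return (script_future and visual_past) or (script_past and visual_future)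
-- ===== Notes on version B (the rewrite author's own statement) =====
-- stated objective: alternative
-- what changed: B computes four boolean tense flags (script past/future, visual past/future) in single passes and combines them with one formula, instead of A's nested loop over script states and indicators that rebuilds and rescans the whole visual-state list inside the inner loop.
import Mathlib
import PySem

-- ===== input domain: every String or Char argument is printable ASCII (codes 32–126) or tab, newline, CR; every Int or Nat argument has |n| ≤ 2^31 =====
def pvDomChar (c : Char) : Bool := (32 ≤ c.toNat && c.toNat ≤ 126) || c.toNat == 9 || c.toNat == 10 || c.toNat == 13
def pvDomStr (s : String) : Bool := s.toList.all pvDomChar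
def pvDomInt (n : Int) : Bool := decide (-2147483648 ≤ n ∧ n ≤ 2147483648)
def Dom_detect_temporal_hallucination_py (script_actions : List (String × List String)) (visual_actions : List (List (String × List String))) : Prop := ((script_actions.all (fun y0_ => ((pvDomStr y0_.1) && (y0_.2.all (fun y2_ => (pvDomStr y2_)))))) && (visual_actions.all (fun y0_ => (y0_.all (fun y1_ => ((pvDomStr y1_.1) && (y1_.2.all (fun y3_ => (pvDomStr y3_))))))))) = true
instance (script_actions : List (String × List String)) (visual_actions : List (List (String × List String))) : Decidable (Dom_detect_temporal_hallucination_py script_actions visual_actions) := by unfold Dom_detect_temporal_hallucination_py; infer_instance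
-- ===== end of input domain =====

-- ===== PORT A =====
-- B replaces A's nested scan (re-building the visual-state list per script state and
-- indicator) by four tense flags computed once and combined (objective: alternative).
def pvIndicators : List (String × String) :=
  [("already", "past"), ("just", "past"), ("about to", "future"), ("going to", "future"), ("will", "future")]

def detect_temporal_hallucination_py (script_actions : List (String × List String)) (visual_actions : List (List (String × List String))) : Bool :=
  let script_states : PySem.Set String := PySem.Set.ofList (PySem.Dict.getD (PySem.Dict.mk script_actions) "states" [])
  script_states.any (fun state =>
    pvIndicators.any (fun p =>
      if PySem.Str.isIn p.1 (PySem.Str.lower state) then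
        let visual_states : List String := visual_actions.foldl (fun acc va => acc ++ PySem.Dict.getD (PySem.Dict.mk va) "states" []) []
        ((if p.2 == "future" then
            visual_states.any (fun vs => PySem.Str.isIn "already" vs || PySem.Str.isIn "just" vs)
          else false)
         ||
         (if p.2 == "past" then
            visual_states.any (fun vs => PySem.Str.isIn "about to" vs || PySem.Str.isIn "going to" vs || PySem.Str.isIn "will" vs)
          else false))
      else false))

-- ===== PORT B =====
def pvPastInds : List String := ["already", "just"]
def pvFutureInds : List String := ["about to", "going to", "will"]

def detect_temporal_hallucination_py_alt (script_actions : List (String × List String)) (visual_actions : List (List (String × List String))) : Bool :=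
  let states := PySem.Dict.getD (PySem.Dict.mk script_actions) "states" []
  let script_past := states.any (fun s => pvPastInds.any (fun i => PySem.Str.isIn i (PySem.Str.lower s)))
  let script_future := states.any (fun s => pvFutureInds.any (fun i => PySem.Str.isIn i (PySem.Str.lower s)))
  if !(script_past || script_future) then false
  else
    let visual_states : List String := visual_actions.foldl (fun acc va => acc ++ PySem.Dict.getD (PySem.Dict.mk va) "states" []) []
    let visual_past := visual_states.any (fun v => PySem.Str.isIn "already" v || PySem.Str.isIn "just" v)
    let visual_future := visual_states.any (fun v => PySem.Str.isIn "about to" v || PySem.Str.isIn "going to" v || PySem.Str.isIn "will" v)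
    (script_future && visual_past) || (script_past && visual_future)

-- ===== PRECONDITION & SPEC =====
def Spec_detect_temporal_hallucination_py (script_actions : List (String × List String)) (visual_actions : List (List (String × List String))) (out : Bool) : Prop := out = detect_temporal_hallucination_py_alt script_actions visual_actions
instance (script_actions : List (String × List String)) (visual_actions : List (List (String × List String))) (out : Bool) : Decidable (Spec_detect_temporal_hallucination_py script_actions visual_actions out) := by unfold Spec_detect_temporal_hallucination_py; infer_instance

-- ===== CLAIM (what is proved, stated in full; the proofs are below) =====
def Claim_equal_detect_temporal_hallucination_py : Prop := ∀ (script_actions : List (String × List String)) (visual_actions : List (List (String × List String))), Dom_detect_temporal_hallucination_py script_actions visual_actions → Spec_detect_temporal_hallucination_py script_actions visual_actions (detect_temporal_hallucination_py script_actions visual_actions)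

-- ===== LEMMAS AND PROOFS =====
theorem any_ofList {α : Type} [BEq α] [LawfulBEq α] (xs : List α) (p : α → Bool) :
    (PySem.Set.ofList xs).any p = xs.any p := by
  rw [Bool.eq_iff_iff]
  simp only [List.any_eq_true]
  constructor
  · rintro ⟨x, hx, hp⟩; exact ⟨x, (PySem.Set.mem_ofList xs x).mp hx, hp⟩
  · rintro ⟨x, hx, hp⟩; exact ⟨x, (PySem.Set.mem_ofList xs x).mpr hx, hp⟩

-- ===== VERDICT (by name: the statement is the Claim_ definition above) =====
theorem detect_temporal_hallucination_py_spec : Claim_equal_detect_temporal_hallucination_py := by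
  intro sa va _dom
  unfold Spec_detect_temporal_hallucination_py
  unfold detect_temporal_hallucination_py detect_temporal_hallucination_py_alt
  simp only [pvIndicators, pvPastInds, pvFutureInds, List.any_cons, List.any_nil]
  generalize (PySem.Dict.getD (PySem.Dict.mk sa) "states" ([] : List String)) = S
  generalize (List.foldl (fun (acc : List String) w => acc ++ PySem.Dict.getD (PySem.Dict.mk w) "states" []) ([] : List String) va) = V
  generalize (V.any (fun vs => PySem.Str.isIn "already" vs || PySem.Str.isIn "just" vs)) = VP
  generalize (V.any (fun vs => PySem.Str.isIn "about to" vs || PySem.Str.isIn "going to" vs || PySem.Str.isIn "will" vs)) = VF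
  rw [Bool.eq_iff_iff]
  rw [any_ofList]
  simp only [List.any_eq_true]
  cases VP <;> cases VF <;>
    cases hP : S.any (fun s => PySem.Str.isIn "already" (PySem.Str.lower s) || (PySem.Str.isIn "just" (PySem.Str.lower s) || false)) <;>
    cases hF : S.any (fun s => PySem.Str.isIn "about to" (PySem.Str.lower s) || (PySem.Str.isIn "going to" (PySem.Str.lower s) || (PySem.Str.isIn "will" (PySem.Str.lower s) || false))) <;>
    simp_all [List.any_eq_true] <;>
    first
      | tauto
      | (obtain ⟨x, hx, h⟩ := hF; exact ⟨x, hx, by tauto⟩)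
      | (obtain ⟨x, hx, h⟩ := hP; exact ⟨x, hx, by tauto⟩)
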